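-- pv_equiv track=rewrite | github.com/lean-accelerate-consultancy/lac-repo-swarm | src/investigator/core/static_analyzers/entity_parser.py | _extract_service_prefix
-- ===== SOURCE A (Python) =====
-- def _extract_service_prefix(resource_type: str) -> str:
--     """Extract logical service prefix from a resource type."""
--     # Remove provider prefix (aws_, azurerm_, google_)
--     for provider in ("aws_", "azurerm_", "google_", "kubernetes_", "helm_"):
--         if resource_type.startswith(provider):
--             resource_type = resource_type[len(provider):]
--             break
--
--     # Group by first meaningful word
--     parts = resource_type.split("_")
--     if parts:
--         return parts[0]
--     return resource_type
-- ===== SOURCE B (Python) =====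
-- def _extract_service_prefix(resource_type: str) -> str:
--     """Extract logical service prefix from a resource type."""
--     parts = resource_type.split("_")
--     if parts[0] in ("aws", "azurerm", "google", "kubernetes", "helm") and len(parts) > 1:
--         return parts[1]
--     return parts[0]
-- ===== Notes on version B (the rewrite author's own statement) =====
-- stated objective: simpler
-- what changed: B tokenises the string once with a single underscore split and conditionally drops a leading provider token via one membership test, instead of A's startswith-loop that strips a provider prefix by slicing before splitting.
import Mathlib
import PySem

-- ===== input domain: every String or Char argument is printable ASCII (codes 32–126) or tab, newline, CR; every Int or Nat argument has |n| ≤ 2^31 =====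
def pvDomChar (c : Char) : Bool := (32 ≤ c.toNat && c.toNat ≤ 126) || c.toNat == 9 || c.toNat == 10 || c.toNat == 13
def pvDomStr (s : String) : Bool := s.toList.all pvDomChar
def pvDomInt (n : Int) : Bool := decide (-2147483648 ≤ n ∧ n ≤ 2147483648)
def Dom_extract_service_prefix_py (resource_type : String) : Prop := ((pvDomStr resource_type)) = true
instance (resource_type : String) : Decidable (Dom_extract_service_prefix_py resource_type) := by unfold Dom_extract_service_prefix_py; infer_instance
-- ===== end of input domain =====

-- B tokenises once with a single split('_') and conditionally drops a leading provider token
-- via one membership test, instead of A's startswith-loop stripping a prefix by slicing before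
-- splitting (objective: simpler).

-- ===== PORT A =====
-- The for-loop with break is unrolled: the first matching provider prefix is stripped.
-- split-and-return-first-part stage of A (exact):
def pvAHead (s : String) : String :=
  let parts := (PySem.Str.split? s "_").getD []
  if parts.isEmpty then s else parts.headD ""

def extract_service_prefix_py (resource_type : String) : String :=
  pvAHead <|
    if PySem.Str.startswith resource_type "aws_" then PySem.Str.slice resource_type (some 4) none
    else if PySem.Str.startswith resource_type "azurerm_" then PySem.Str.slice resource_type (some 8) none
    else if PySem.Str.startswith resource_type "google_" then PySem.Str.slice resource_type (some 7) none
    else if PySem.Str.startswith resource_type "kubernetes_" then PySem.Str.slice resource_type (some 11) none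
    else if PySem.Str.startswith resource_type "helm_" then PySem.Str.slice resource_type (some 5) none
    else resource_type

-- ===== PORT B =====
def extract_service_prefix_py_alt (resource_type : String) : String :=
  let parts := (PySem.Str.split? resource_type "_").getD []
  let p0 := parts.headD ""
  if ["aws", "azurerm", "google", "kubernetes", "helm"].contains p0 && decide (1 < parts.length) then
    parts.getD 1 ""
  else p0

-- ===== PRECONDITION & SPEC =====
def Spec_extract_service_prefix_py (resource_type : String) (out : String) : Prop := out = extract_service_prefix_py_alt resource_type
instance (resource_type : String) (out : String) : Decidable (Spec_extract_service_prefix_py resource_type out) := by unfold Spec_extract_service_prefix_py; infer_instance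

-- ===== CLAIM (what is proved, stated in full; the proofs are below) =====
def Claim_equal_extract_service_prefix_py : Prop := ∀ (resource_type : String), Dom_extract_service_prefix_py resource_type → Spec_extract_service_prefix_py resource_type (extract_service_prefix_py resource_type)

-- ===== LEMMAS AND PROOFS =====

/-- Reference splitter on single separator '_' (structural recursion). -/
def pvSplitU : List Char → List (List Char)
  | [] => [[]]
  | c :: rest =>
    if c = '_' then [] :: pvSplitU rest
    else
      match pvSplitU rest with
      | [] => [[c]]
      | h :: t => (c :: h) :: t

lemma pvHeadD_tail {α : Type} (l : List (List α)) (h : l ≠ []) : l.headD [] :: l.tail = l := by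
  cases l with
  | nil => exact absurd rfl h
  | cons a t => simp

lemma pvSplitU_ne_nil (l : List Char) : pvSplitU l ≠ [] := by
  cases l with
  | nil => simp [pvSplitU]
  | cons c rest =>
    simp only [pvSplitU]
    split
    · simp
    · cases h : pvSplitU rest <;> simp

lemma pvGo (fuel : Nat) : ∀ (l cur : List Char) (acc : List (List Char)), l.length < fuel →
    PySem.Chars.splitOn.go ['_'] fuel l cur acc =
      acc.reverse ++ ((cur.reverse ++ (pvSplitU l).headD []) :: (pvSplitU l).tail) := by
  induction fuel with
  | zero => intro l cur acc h; omega
  | succ f ih =>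
    intro l cur acc h
    cases l with
    | nil => simp [PySem.Chars.splitOn.go, pvSplitU]
    | cons c rest =>
      by_cases hc : c = '_'
      · subst hc
        have hpre : List.isPrefixOf ['_'] ('_' :: rest) = true := by simp [List.isPrefixOf]
        rw [PySem.Chars.splitOn.go]
        simp only [hpre, if_true, List.length_cons, List.length_nil,
          List.drop_succ_cons, List.drop_zero]
        rw [ih rest [] (cur.reverse :: acc) (by simpa using Nat.lt_of_succ_lt_succ h)]
        simp [pvSplitU]
        simpa using pvHeadD_tail _ (pvSplitU_ne_nil rest)
      · have hpre : List.isPrefixOf ['_'] (c :: rest) = false := by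
          simp [List.isPrefixOf]; exact fun hh => hc hh.symm
        rw [PySem.Chars.splitOn.go]
        simp only [hpre, Bool.false_eq_true, if_false]
        rw [ih rest (c :: cur) acc (by simpa using Nat.lt_of_succ_lt_succ h)]
        rcases hrest : pvSplitU rest with _ | ⟨hd, tl⟩
        · exact absurd hrest (pvSplitU_ne_nil rest)
        · simp [pvSplitU, hc, hrest]

lemma pvSplitOn (s : List Char) : PySem.Chars.splitOn s ['_'] = pvSplitU s := by
  unfold PySem.Chars.splitOn
  rw [pvGo (s.length + 1) s [] [] (by omega)]
  rcases h : pvSplitU s with _ | ⟨hd, tl⟩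
  · exact absurd h (pvSplitU_ne_nil s)
  · simp

lemma pvSplit_eq (s : String) :
    (PySem.Str.split? s "_").getD [] = (pvSplitU s.toList).map String.ofList := by
  have : ("_" : String).toList = ['_'] := rfl
  simp [PySem.Str.split?, PySem.Chars.split?, this, pvSplitOn]

lemma pvSplitU_append (p : List Char) (hp : '_' ∉ p) (s : List Char) :
    pvSplitU (p ++ '_' :: s) = p :: pvSplitU s := by
  induction p with
  | nil => simp [pvSplitU]
  | cons c p' ih =>
    have hc : c ≠ '_' := fun h => hp (by simp [h])
    have ih' := ih (fun h => hp (by simp [h]))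
    simp only [List.cons_append, pvSplitU, hc, if_false, ih']

lemma pvSplitU_cons_cons : ∀ (s p0 p1 : List Char) (t : List (List Char)),
    pvSplitU s = p0 :: p1 :: t → ∃ r, s = p0 ++ '_' :: r ∧ pvSplitU r = p1 :: t := by
  intro s
  induction s with
  | nil => intro p0 p1 t h; simp [pvSplitU] at h
  | cons c rest ih =>
    intro p0 p1 t h
    by_cases hc : c = '_'
    · subst hc
      simp only [pvSplitU, if_true] at h
      obtain ⟨h0, h1⟩ := List.cons.inj h
      exact ⟨rest, by simp [← h0], h1⟩
    · simp only [pvSplitU, hc, if_false] at h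
      rcases hrest : pvSplitU rest with _ | ⟨hd, tl⟩
      · exact absurd hrest (pvSplitU_ne_nil rest)
      · rw [hrest] at h
        obtain ⟨h0, h1⟩ := List.cons.inj h
        cases tl with
        | nil => simp at h1
        | cons q tq =>
          obtain ⟨hq, htq⟩ := List.cons.inj h1
          obtain ⟨r, hr, hru⟩ := ih hd q tq (by rw [hrest, hq, htq])
          refine ⟨r, ?_, by rw [hru, hq, htq]⟩
          rw [← h0, hr]; simp

/-- B's value in terms of pvSplitU. -/
lemma pvB_char (rt : String) :
    extract_service_prefix_py_alt rt =
      match pvSplitU rt.toList with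
      | p0 :: p1 :: _ =>
        if String.ofList p0 ∈ (["aws", "azurerm", "google", "kubernetes", "helm"] : List String)
        then String.ofList p1 else String.ofList p0
      | p0 :: [] => String.ofList p0
      | [] => "" := by
  unfold extract_service_prefix_py_alt
  rw [pvSplit_eq]
  rcases h : pvSplitU rt.toList with _ | ⟨p0, _ | ⟨p1, t⟩⟩
  · exact absurd h (pvSplitU_ne_nil rt.toList)
  · simp
  · by_cases hm : String.ofList p0 ∈ (["aws", "azurerm", "google", "kubernetes", "helm"] : List String)
    · simp [hm]
    · simp [hm]

/-- A's split-and-take-head stage in terms of pvSplitU. -/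
lemma pvA_char (s : String) :
    pvAHead s = String.ofList ((pvSplitU s.toList).headD []) := by
  unfold pvAHead
  rw [pvSplit_eq]
  rcases h : pvSplitU s.toList with _ | ⟨hd, tl⟩
  · exact absurd h (pvSplitU_ne_nil s.toList)
  · simp

/-- In a provider branch: rt = stem ++ '_' ++ r; both sides return the head of pvSplitU r. -/
lemma pv_pos (rt stem : String) (r : List Char) (hp : '_' ∉ stem.toList)
    (hmem : stem ∈ (["aws", "azurerm", "google", "kubernetes", "helm"] : List String))
    (hr : rt.toList = stem.toList ++ '_' :: r) :
    extract_service_prefix_py_alt rt = String.ofList ((pvSplitU r).headD []) := by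
  rw [pvB_char, hr, pvSplitU_append stem.toList hp r]
  rcases h : pvSplitU r with _ | ⟨hd, tl⟩
  · exact absurd h (pvSplitU_ne_nil r)
  · simp [hmem]

lemma pvStartswith (rt p : String) :
    PySem.Str.startswith rt p = true ↔ p.toList <+: rt.toList := by
  have : PySem.Str.startswith rt p = PySem.Chars.startswith rt.toList p.toList := by simp
  rw [this, PySem.Chars.startswith_iff]

lemma pvSliceDrop (rt : String) (k : Int) (hk : 0 ≤ k) :
    (PySem.Str.slice rt (some k) none).toList = rt.toList.drop k.toNat := by
  rw [PySem.Str.toList_slice, PySem.Chars.slice_eq_listSlice,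
      PySem.List.slice_from rt.toList hk]

/-- Positive-branch helper: extract r from a prefix of shape stem ++ "_" and conclude. -/
lemma pv_pos_case (rt stem : String) (k : Nat)
    (hk : stem.toList.length + 1 = k) (hp : '_' ∉ stem.toList)
    (hmem : stem ∈ (["aws", "azurerm", "google", "kubernetes", "helm"] : List String))
    (hpre : (stem.toList ++ ['_']) <+: rt.toList) :
    String.ofList ((pvSplitU (rt.toList.drop k)).headD []) =
      extract_service_prefix_py_alt rt := by
  obtain ⟨r, hr⟩ := hpre
  have hrt : rt.toList = stem.toList ++ '_' :: r := by rw [← hr]; simp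
  have hdrop : rt.toList.drop k = r := by
    rw [hrt, ← hk]
    rw [show stem.toList.length + 1 = stem.toList.length + 1 from rfl]
    simp [List.drop_append]
  rw [hdrop, pv_pos rt stem r hp hmem hrt]

-- ===== VERDICT (by name: the statement is the Claim_ definition above) =====
theorem extract_service_prefix_py_spec : Claim_equal_extract_service_prefix_py := by
  intro rt _
  unfold Spec_extract_service_prefix_py extract_service_prefix_py
  by_cases h1 : PySem.Str.startswith rt "aws_" = true
  · have hpre : (("aws" : String).toList ++ ['_']) <+: rt.toList := (pvStartswith rt "aws_").mp h1
    simp only [h1, if_true]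
    rw [pvA_char, pvSliceDrop rt 4 (by norm_num)]
    exact pv_pos_case rt "aws" ((4 : Int).toNat) (by decide) (by decide) (by decide) hpre
  · by_cases h2 : PySem.Str.startswith rt "azurerm_" = true
    · have hpre : (("azurerm" : String).toList ++ ['_']) <+: rt.toList := (pvStartswith rt "azurerm_").mp h2
      simp only [h1, h2, Bool.false_eq_true, if_true, if_false]
      rw [pvA_char, pvSliceDrop rt 8 (by norm_num)]
      exact pv_pos_case rt "azurerm" ((8 : Int).toNat) (by decide) (by decide) (by decide) hpre
    · by_cases h3 : PySem.Str.startswith rt "google_" = true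
      · have hpre : (("google" : String).toList ++ ['_']) <+: rt.toList := (pvStartswith rt "google_").mp h3
        simp only [h1, h2, h3, Bool.false_eq_true, if_true, if_false]
        rw [pvA_char, pvSliceDrop rt 7 (by norm_num)]
        exact pv_pos_case rt "google" ((7 : Int).toNat) (by decide) (by decide) (by decide) hpre
      · by_cases h4 : PySem.Str.startswith rt "kubernetes_" = true
        · have hpre : (("kubernetes" : String).toList ++ ['_']) <+: rt.toList := (pvStartswith rt "kubernetes_").mp h4
          simp only [h1, h2, h3, h4, Bool.false_eq_true, if_true, if_false]
          rw [pvA_char, pvSliceDrop rt 11 (by norm_num)]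
          exact pv_pos_case rt "kubernetes" ((11 : Int).toNat) (by decide) (by decide) (by decide) hpre
        · by_cases h5 : PySem.Str.startswith rt "helm_" = true
          · have hpre : (("helm" : String).toList ++ ['_']) <+: rt.toList := (pvStartswith rt "helm_").mp h5
            simp only [h1, h2, h3, h4, h5, Bool.false_eq_true, if_true, if_false]
            rw [pvA_char, pvSliceDrop rt 5 (by norm_num)]
            exact pv_pos_case rt "helm" ((5 : Int).toNat) (by decide) (by decide) (by decide) hpre
          · -- no provider prefix matches
            simp only [h1, h2, h3, h4, h5, Bool.false_eq_true, if_false]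
            rw [pvA_char]
            rw [pvB_char]
            rcases h : pvSplitU rt.toList with _ | ⟨p0, _ | ⟨p1, t⟩⟩
            · exact absurd h (pvSplitU_ne_nil rt.toList)
            · simp
            · obtain ⟨r, hr, _⟩ := pvSplitU_cons_cons rt.toList p0 p1 t h
              have hnot : String.ofList p0 ∉ (["aws", "azurerm", "google", "kubernetes", "helm"] : List String) := by
                intro hm
                have hpl : ∀ stem : String, String.ofList p0 = stem → p0 = stem.toList := by
                  intro stem hs
                  have := congrArg String.toList hs
                  simpa using this
                simp only [List.mem_cons, List.not_mem_nil] at hm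
                rcases hm with hm | hm | hm | hm | hm | hm
                · exact h1 ((pvStartswith rt "aws_").mpr ⟨r, by rw [hr, hpl _ hm]; simp⟩)
                · exact h2 ((pvStartswith rt "azurerm_").mpr ⟨r, by rw [hr, hpl _ hm]; simp⟩)
                · exact h3 ((pvStartswith rt "google_").mpr ⟨r, by rw [hr, hpl _ hm]; simp⟩)
                · exact h4 ((pvStartswith rt "kubernetes_").mpr ⟨r, by rw [hr, hpl _ hm]; simp⟩)
                · exact h5 ((pvStartswith rt "helm_").mpr ⟨r, by rw [hr, hpl _ hm]; simp⟩)
                · exact hm.elim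
              simp [hnot]
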